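-- pv_equiv track=rewrite | github.com/juwkim/boj | 백준/Silver/13522. Compiler/Compiler.py | solve
-- ===== SOURCE A (Python) =====
-- def solve(N):
--     if N == 0:
--         return ['ZE A']
--     if N == 1:
--         return ['ST A']
--     if N == 2:
--         return ['PH X', 'PH X', 'AD', 'PL A']
--     cnt, res = min([(cnt, solve(N//cnt)) for cnt in range(2, 4)], key=lambda x: len(x[1]) + 2 * (x[0] + N % x[0]))
--     res.extend(['PH A']*cnt)
--     res.extend(['AD']*(cnt-1))
--     res.extend(['PH X', 'AD']*(N%cnt))
--     res.append('PL A')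
--     return res
-- ===== SOURCE B (Python) =====
-- def solve(N):
--     # length[n] = length of the optimal program for n (ints only; no lists cached)
--     length = {0: 1, 1: 1, 2: 4}
--
--     def L(n):
--         if n not in length:
--             a = L(n // 2) + 2 * (2 + n % 2)
--             b = L(n // 3) + 2 * (3 + n % 3)
--             length[n] = a if a <= b else b
--         return length[n]
--
--     # descend from N recording the chosen (divisor, remainder) chain
--     steps = []
--     n = N
--     while n > 2:
--         c = 2 if L(n // 2) + 2 * (2 + n % 2) <= L(n // 3) + 2 * (3 + n % 3) else 3
--         steps.append((c, n % c))
--         n //= c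
--
--     # emit the program bottom-up in one pass
--     prog = list({0: ['ZE A'], 1: ['ST A'], 2: ['PH X', 'PH X', 'AD', 'PL A']}[n])
--     for c, r in reversed(steps):
--         prog += ['PH A'] * c + ['AD'] * (c - 1) + ['PH X', 'AD'] * r + ['PL A']
--     return prog
-- ===== Notes on version B (the rewrite author's own statement) =====
-- stated objective: faster
-- what changed: Replaces A's exponential recursion that builds and compares whole instruction lists with an integer-only memoized length table, an iterative descent recording the chosen (divisor, remainder) chain, and a single final emission pass that concatenates the suffixes.
import Mathlib
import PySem

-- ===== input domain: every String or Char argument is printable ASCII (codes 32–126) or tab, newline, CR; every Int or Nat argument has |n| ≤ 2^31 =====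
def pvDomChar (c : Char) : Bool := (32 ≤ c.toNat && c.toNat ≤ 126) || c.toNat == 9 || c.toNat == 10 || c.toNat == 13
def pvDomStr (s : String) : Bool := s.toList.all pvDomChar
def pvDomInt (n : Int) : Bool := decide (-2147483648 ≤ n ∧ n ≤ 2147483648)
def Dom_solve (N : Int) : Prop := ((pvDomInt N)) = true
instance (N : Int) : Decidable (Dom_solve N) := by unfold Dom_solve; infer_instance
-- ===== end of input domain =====

-- B replaces A's exponential list-building recursion by an integer-only memoized length
-- table, an iterative descent recording the chosen (divisor, remainder) chain, and one
-- final emission pass (objective: faster, asymptotic).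
-- Note: A mutates the sub-result list in place before returning it; the list is freshly
-- built per call, so only the return value is observable — the equivalence is about it.

-- ===== PORT A =====
-- Fuel makes the recursion total in Lean; for 0 ≤ N fuel N.toNat+1 always suffices
-- (each recursive call strictly decreases N), so the port is exact there.
-- Python's min over the 2-element list [(2, r2), (3, r3)] with the length key returns the
-- FIRST minimal element, i.e. (2, r2) iff key2 ≤ key3 — ported as that exact comparison.
def solveFuelA : Nat → Int → List String
  | 0, _ => []
  | f + 1, N =>
    if N = 0 then ["ZE A"]
    else if N = 1 then ["ST A"]
    else if N = 2 then ["PH X", "PH X", "AD", "PL A"]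
    else
      let r2 := solveFuelA f (PySem.Int.floordiv N 2)
      let r3 := solveFuelA f (PySem.Int.floordiv N 3)
      let p := if (r2.length : Int) + 2 * (2 + PySem.Int.mod N 2) ≤
                  (r3.length : Int) + 2 * (3 + PySem.Int.mod N 3)
               then ((2 : Int), r2) else ((3 : Int), r3)
      p.2 ++ PySem.List.pyRepeat ["PH A"] p.1 ++ PySem.List.pyRepeat ["AD"] (p.1 - 1) ++
        PySem.List.pyRepeat ["PH X", "AD"] (PySem.Int.mod N p.1) ++ ["PL A"]

def solve (N : Int) : List String := solveFuelA (N.toNat + 1) N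

-- ===== PORT B =====
-- L: the memoized program-length function of Source B (ints only), threading the dict.
def lenB : Nat → Int → PySem.Dict Int Int → (Int × PySem.Dict Int Int)
  | 0, _, d => (0, d)
  | f + 1, n, d =>
    match d.get? n with
    | some v => (v, d)
    | none =>
      let ad := lenB f (PySem.Int.floordiv n 2) d
      let bd := lenB f (PySem.Int.floordiv n 3) ad.2
      let a := ad.1 + 2 * (2 + PySem.Int.mod n 2)
      let b := bd.1 + 2 * (3 + PySem.Int.mod n 3)
      let v := if a ≤ b then a else b
      (v, bd.2.insert n v)

-- the while loop: descend from n recording the chosen (divisor, remainder) steps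
def descendB : Nat → Int → PySem.Dict Int Int → List (Int × Int) →
    (Int × List (Int × Int) × PySem.Dict Int Int)
  | 0, n, d, steps => (n, steps, d)
  | f + 1, n, d, steps =>
    if 2 < n then
      let ad := lenB (f + 1) (PySem.Int.floordiv n 2) d
      let bd := lenB (f + 1) (PySem.Int.floordiv n 3) ad.2
      let c : Int := if ad.1 + 2 * (2 + PySem.Int.mod n 2) ≤
                        bd.1 + 2 * (3 + PySem.Int.mod n 3) then 2 else 3
      descendB f (PySem.Int.floordiv n c) bd.2 (steps ++ [(c, PySem.Int.mod n c)])
    else (n, steps, d)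

-- one loop-body of the emission pass: prog += ['PH A']*c + ['AD']*(c-1) + ['PH X','AD']*r + ['PL A']
def emitStep (acc : List String) (p : Int × Int) : List String :=
  acc ++ PySem.List.pyRepeat ["PH A"] p.1 ++ PySem.List.pyRepeat ["AD"] (p.1 - 1) ++
    PySem.List.pyRepeat ["PH X", "AD"] p.2 ++ ["PL A"]

-- the base-case table lookup ending the descent; for negative N the Python
-- lookup raises KeyError — those N are outside Pre_solve.
def baseProg (m : Int) : List String :=
  if m = 0 then ["ZE A"]
  else if m = 1 then ["ST A"]
  else ["PH X", "PH X", "AD", "PL A"]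

def solve_alt (N : Int) : List String :=
  let d0 : PySem.Dict Int Int := ((PySem.Dict.empty.insert 0 1).insert 1 1).insert 2 4
  let r := descendB (N.toNat + 1) N d0 []
  r.2.1.reverse.foldl emitStep (baseProg r.1)

-- ===== PRECONDITION & SPEC =====
-- Pre_ excludes exactly N < 0, where A recurses forever (RecursionError) and B raises KeyError.
def Pre_solve (N : Int) : Prop := 0 ≤ N
instance (N : Int) : Decidable (Pre_solve N) := by unfold Pre_solve; infer_instance
def pvWitness_solve : Int := (7)
def Spec_solve (N : Int) (out : List String) : Prop := out = solve_alt N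
instance (N : Int) (out : List String) : Decidable (Spec_solve N out) := by unfold Spec_solve; infer_instance

-- ===== CLAIM (what is proved, stated in full; the proofs are below) =====
def Claim_equal_solve : Prop := ∀ (N : Int), Dom_solve N → Pre_solve N → Spec_solve N (solve N)

-- ===== LEMMAS AND PROOFS =====

theorem sub2_lt (n : Int) (h3 : 3 ≤ n) :
    0 ≤ PySem.Int.floordiv n 2 ∧ PySem.Int.floordiv n 2 < n := by
  constructor
  · rw [PySem.Int.le_floordiv_iff_mul_le (by norm_num)]; omega
  · rw [PySem.Int.floordiv_lt_iff_lt_mul (by norm_num)]; omega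

theorem sub3_lt (n : Int) (h3 : 3 ≤ n) :
    0 ≤ PySem.Int.floordiv n 3 ∧ PySem.Int.floordiv n 3 < n := by
  constructor
  · rw [PySem.Int.le_floordiv_iff_mul_le (by norm_num)]; omega
  · rw [PySem.Int.floordiv_lt_iff_lt_mul (by norm_num)]; omega

-- the canonical value of A and its length
def Aval (N : Int) : List String := solveFuelA (N.toNat + 1) N
def Lval (N : Int) : Int := ((Aval N).length : Int)

theorem fuelA_irrel : ∀ (f : Nat) (N : Int), 0 ≤ N → N < (f : Int) →
    solveFuelA f N = Aval N := by
  intro f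
  induction f using Nat.strong_induction_on with
  | _ f ih =>
    intro N h0 hf
    match f with
    | 0 => exact absurd hf (by push_cast; omega)
    | g + 1 =>
      by_cases e0 : N = 0
      · simp [Aval, solveFuelA, e0]
      by_cases e1 : N = 1
      · simp [Aval, solveFuelA, e1]
      by_cases e2 : N = 2
      · simp [Aval, solveFuelA, e2]
      · have h3 : 3 ≤ N := by omega
        have h2 := sub2_lt N h3
        have h3' := sub3_lt N h3
        show solveFuelA (g + 1) N = solveFuelA (N.toNat + 1) N
        have hNg : N ≤ (g : Int) := by push_cast at hf ⊢; omega
        rw [solveFuelA, solveFuelA]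
        rw [ih g (by omega) _ h2.1 (by omega), ih g (by omega) _ h3'.1 (by omega),
            ih N.toNat (by omega) _ h2.1 (by omega), ih N.toNat (by omega) _ h3'.1 (by omega)]

-- A's recursion, written with B's emitStep: one unfolding of Aval
theorem Aval_step (n : Int) (h3 : 3 ≤ n) :
    Aval n = if Lval (PySem.Int.floordiv n 2) + 2 * (2 + PySem.Int.mod n 2) ≤
                Lval (PySem.Int.floordiv n 3) + 2 * (3 + PySem.Int.mod n 3)
             then emitStep (Aval (PySem.Int.floordiv n 2)) (2, PySem.Int.mod n 2)
             else emitStep (Aval (PySem.Int.floordiv n 3)) (3, PySem.Int.mod n 3) := by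
  have h2 := sub2_lt n h3
  have h3' := sub3_lt n h3
  show solveFuelA (n.toNat + 1) n = _
  rw [solveFuelA]
  rw [if_neg (by omega), if_neg (by omega), if_neg (by omega)]
  rw [fuelA_irrel n.toNat _ h2.1 (by omega), fuelA_irrel n.toNat _ h3'.1 (by omega)]
  simp only [Lval, emitStep]
  split_ifs <;> norm_num

theorem length_emitStep (acc : List String) (c r : Int) (h1 : 1 ≤ c) (h0 : 0 ≤ r) :
    ((emitStep acc (c, r)).length : Int) = (acc.length : Int) + 2 * (c + r) := by
  simp [emitStep, PySem.List.pyRepeat]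
  omega

theorem Lval_step (n : Int) (h3 : 3 ≤ n) :
    Lval n = if Lval (PySem.Int.floordiv n 2) + 2 * (2 + PySem.Int.mod n 2) ≤
                Lval (PySem.Int.floordiv n 3) + 2 * (3 + PySem.Int.mod n 3)
             then Lval (PySem.Int.floordiv n 2) + 2 * (2 + PySem.Int.mod n 2)
             else Lval (PySem.Int.floordiv n 3) + 2 * (3 + PySem.Int.mod n 3) := by
  have hm2 : (0:Int) ≤ PySem.Int.mod n 2 := PySem.Int.mod_nonneg n (by norm_num)
  have hm3 : (0:Int) ≤ PySem.Int.mod n 3 := PySem.Int.mod_nonneg n (by norm_num)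
  show ((Aval n).length : Int) = _
  rw [Aval_step n h3]
  split_ifs with h
  · rw [length_emitStep _ _ _ (by norm_num) hm2]; rfl
  · rw [length_emitStep _ _ _ (by norm_num) hm3]; rfl

-- memo invariant: 0, 1, 2 are cached and every cached value is the A-length of its key
def Inv2 (d : PySem.Dict Int Int) : Prop :=
  (d.get? 0).isSome ∧ (d.get? 1).isSome ∧ (d.get? 2).isSome ∧
  ∀ k v, d.get? k = some v → v = Lval k

theorem Inv2_insert {d : PySem.Dict Int Int} (hd : Inv2 d) (k v : Int) (hv : v = Lval k) :
    Inv2 (d.insert k v) := by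
  obtain ⟨h0, h1, h2, hs⟩ := hd
  refine ⟨?_, ?_, ?_, ?_⟩
  · rw [PySem.Dict.get?_insert]; split_ifs <;> simp_all
  · rw [PySem.Dict.get?_insert]; split_ifs <;> simp_all
  · rw [PySem.Dict.get?_insert]; split_ifs <;> simp_all
  · intro k' v' hget
    rw [PySem.Dict.get?_insert] at hget
    by_cases e : k' = k
    · simp [e] at hget; simp [← hget, e, hv]
    · simp [e] at hget; exact hs k' v' hget

theorem lenB_correct : ∀ (f : Nat) (n : Int) (d : PySem.Dict Int Int),
    0 ≤ n → n < (f : Int) → Inv2 d →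
    (lenB f n d).1 = Lval n ∧ Inv2 (lenB f n d).2 := by
  intro f
  induction f using Nat.strong_induction_on with
  | _ f ih =>
    intro n d h0 hf hInv
    match f with
    | 0 => exact absurd hf (by push_cast; omega)
    | g + 1 =>
      rw [lenB]
      cases hget : d.get? n with
      | some v => exact ⟨hInv.2.2.2 n v hget, hInv⟩
      | none =>
        have hd0 := hInv.1
        have hd1 := hInv.2.1
        have hd2 := hInv.2.2.1
        have hn0 : n ≠ 0 := by rintro rfl; rw [hget] at hd0; simp at hd0
        have hn1 : n ≠ 1 := by rintro rfl; rw [hget] at hd1; simp at hd1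
        have hn2 : n ≠ 2 := by rintro rfl; rw [hget] at hd2; simp at hd2
        have h3 : 3 ≤ n := by omega
        have h2 := sub2_lt n h3
        have h3' := sub3_lt n h3
        have hng : n ≤ (g : Int) := by push_cast at hf ⊢; omega
        obtain ⟨ha, hIa⟩ := ih g (by omega) (PySem.Int.floordiv n 2) d h2.1 (by omega) hInv
        obtain ⟨hb, hIb⟩ := ih g (by omega) (PySem.Int.floordiv n 3) _ h3'.1 (by omega) hIa
        simp only [ha, hb]
        have hv : (if Lval (PySem.Int.floordiv n 2) + 2 * (2 + PySem.Int.mod n 2) ≤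
                      Lval (PySem.Int.floordiv n 3) + 2 * (3 + PySem.Int.mod n 3)
                   then Lval (PySem.Int.floordiv n 2) + 2 * (2 + PySem.Int.mod n 2)
                   else Lval (PySem.Int.floordiv n 3) + 2 * (3 + PySem.Int.mod n 3)) = Lval n :=
          (Lval_step n h3).symm
        exact ⟨hv, Inv2_insert hIb n _ hv⟩

theorem descend_correct : ∀ (f : Nat) (n : Int) (d : PySem.Dict Int Int)
    (steps : List (Int × Int)), 0 ≤ n → n < (f : Int) → Inv2 d →
    (descendB f n d steps).2.1.reverse.foldl emitStep (baseProg (descendB f n d steps).1) =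
      steps.reverse.foldl emitStep (Aval n) := by
  intro f
  induction f using Nat.strong_induction_on with
  | _ f ih =>
    intro n d steps h0 hf hInv
    match f with
    | 0 => exact absurd hf (by push_cast; omega)
    | g + 1 =>
      rw [descendB]
      by_cases hgt : 2 < n
      · rw [if_pos hgt]
        have h3 : 3 ≤ n := by omega
        have h2 := sub2_lt n h3
        have h3' := sub3_lt n h3
        have hng : n ≤ (g : Int) := by push_cast at hf ⊢; omega
        obtain ⟨ha, hIa⟩ := lenB_correct (g + 1) (PySem.Int.floordiv n 2) d h2.1
          (by push_cast; omega) hInv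
        obtain ⟨hb, hIb⟩ := lenB_correct (g + 1) (PySem.Int.floordiv n 3) _ h3'.1
          (by push_cast; omega) hIa
        simp only [ha, hb]
        by_cases hc : Lval (PySem.Int.floordiv n 2) + 2 * (2 + PySem.Int.mod n 2) ≤
            Lval (PySem.Int.floordiv n 3) + 2 * (3 + PySem.Int.mod n 3)
        · rw [if_pos hc]
          rw [ih g (by omega) _ _ _ h2.1 (by omega) hIb]
          rw [List.reverse_append, List.reverse_singleton, List.singleton_append,
              List.foldl_cons]
          rw [Aval_step n h3, if_pos hc]
        · rw [if_neg hc]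
          rw [ih g (by omega) _ _ _ h3'.1 (by omega) hIb]
          rw [List.reverse_append, List.reverse_singleton, List.singleton_append,
              List.foldl_cons]
          rw [Aval_step n h3, if_neg hc]
      · rw [if_neg hgt]
        have : n = 0 ∨ n = 1 ∨ n = 2 := by omega
        rcases this with rfl | rfl | rfl <;> rfl

theorem Inv2_d0 :
    Inv2 (((PySem.Dict.empty.insert (0:Int) (1:Int)).insert 1 1).insert 2 4) := by
  refine ⟨by decide, by decide, by decide, ?_⟩
  intro k v hget
  rw [PySem.Dict.get?_insert] at hget
  by_cases e2 : k = 2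
  · simp [e2] at hget; subst e2; rw [← hget]; decide
  rw [if_neg e2, PySem.Dict.get?_insert] at hget
  by_cases e1 : k = 1
  · simp [e1] at hget; subst e1; rw [← hget]; decide
  rw [if_neg e1, PySem.Dict.get?_insert] at hget
  by_cases e0 : k = 0
  · simp [e0] at hget; subst e0; rw [← hget]; decide
  · rw [if_neg e0, PySem.Dict.get?_empty] at hget; cases hget

-- ===== VERDICT (by name: the statement is the Claim_ definition above) =====
theorem solve_spec : Claim_equal_solve := by
  intro N _ hPre
  unfold Spec_solve solve solve_alt
  have h := descend_correct (N.toNat + 1) N _ [] hPre (by push_cast; omega) Inv2_d0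
  simpa using h.symm
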